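-- pv_equiv track=rewrite | github.com/AlexMorson/gsa-ultra-2018 | ball/code.py | solution
-- ===== SOURCE A (Python) =====
-- import collections
-- import math
--
-- def solution(n, c):
--     swaps = {i:set() for i in range(n)}
--     for u, v in c:
--         swaps[u-1].add(v-1)
--         swaps[v-1].add(u-1)
--
--     seen = set()
--     visit = collections.deque()
--     sizes = []
--     for i in range(n):
--         if i not in seen:
--             c = 0
--             visit.append(i)
--             while visit:
--                 box = visit.popleft()
--                 if box not in seen:
--                     c += 1
--                     seen.add(box)
--                     for swappable in swaps[box]:
--                         visit.append(swappable)
--             sizes.append(c)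
--
--     answer = 1
--     mod = 10**9 + 7
--     for size in sizes:
--         answer *= math.factorial(size) % mod
--         answer %= mod
--     return answer
-- ===== SOURCE B (Python) =====
-- import math
--
-- def solution(n, c):
--     # Partition-merging: no graph traversal at all. Fold every edge into a list of
--     # disjoint blocks, merging the two blocks its endpoints belong to, then take the
--     # factorial product of the block lengths.
--     blocks = [[i] for i in range(n)]
--     for u, v in c:
--         a, b = u - 1, v - 1
--         ba = next(blk for blk in blocks if a in blk)
--         bb = next(blk for blk in blocks if b in blk)
--         if ba != bb:
--             blocks = [blk for blk in blocks if blk != ba and blk != bb] + [ba + bb]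
--     mod = 10**9 + 7
--     answer = 1
--     for blk in blocks:
--         answer = answer * math.factorial(len(blk)) % mod
--     return answer
-- ===== Notes on version B (the rewrite author's own statement) =====
-- stated objective: alternative
-- what changed: Replaces A's adjacency dict + BFS flood fill with visited set by a partition-merging (union-of-blocks) scheme: start from singleton blocks and fold each edge by merging the two blocks containing its endpoints, with no graph traversal, worklist or visited set at all; a proof that both block families are exactly the connected-component classes (up to order) gives equality of the factorial products mod 1e9+7.
-- outside the precondition, e.g. on solution(2, [(1, 3)]): A raises KeyError, B raises StopIteration
import Mathlib
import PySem

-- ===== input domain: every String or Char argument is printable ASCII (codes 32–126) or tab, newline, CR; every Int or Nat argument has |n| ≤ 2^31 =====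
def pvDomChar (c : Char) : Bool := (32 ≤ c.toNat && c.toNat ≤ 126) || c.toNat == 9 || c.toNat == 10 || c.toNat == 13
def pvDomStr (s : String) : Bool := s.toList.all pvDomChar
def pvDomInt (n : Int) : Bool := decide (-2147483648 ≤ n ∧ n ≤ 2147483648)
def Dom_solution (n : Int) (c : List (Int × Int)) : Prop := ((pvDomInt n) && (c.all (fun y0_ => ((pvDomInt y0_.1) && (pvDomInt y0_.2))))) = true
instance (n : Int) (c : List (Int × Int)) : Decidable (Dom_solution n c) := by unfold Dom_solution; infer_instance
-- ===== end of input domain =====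

-- B replaces A's adjacency dict + BFS flood fill by a partition-merging scheme (fold each edge
-- by merging the two blocks containing its endpoints); objective: alternative.

-- shared primitive: math.factorial (argument is a nonnegative size in both programs)
def pyFactorial (k : Int) : Int := (Nat.factorial k.toNat : Int)

-- ===== PORT A =====
-- the BFS while-loop over (seen, visit-deque, per-component counter); the fuel argument only
-- makes the recursion structural — it is proved sufficient on Pre_ inputs (bfsLoop_char below)
def bfsLoop (N : Int → List Int) : Nat → PySem.Set Int → List Int → Int → (PySem.Set Int × Int)
  | _, seen, [], cnt => (seen, cnt)
  | 0, seen, _ :: _, cnt => (seen, cnt)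
  | fuel + 1, seen, box :: rest, cnt =>
      if box ∈ seen then bfsLoop N fuel seen rest cnt
      else bfsLoop N fuel (PySem.Set.add seen box) (rest ++ N box) (cnt + 1)

def solution (n : Int) (c : List (Int × Int)) : Int :=
  -- swaps = {i: set() for i in range(n)}; for u, v in c: swaps[u-1].add(v-1); swaps[v-1].add(u-1)
  let swaps0 : PySem.Dict Int (PySem.Set Int) :=
    (PySem.List.pyRange 0 n 1).foldl (fun d i => d.insert i PySem.Set.empty) PySem.Dict.empty
  let swaps := c.foldl (fun d p =>
      let d1 := d.insert (p.1 - 1) (PySem.Set.add (d.getD (p.1 - 1) PySem.Set.empty) (p.2 - 1))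
      d1.insert (p.2 - 1) (PySem.Set.add (d1.getD (p.2 - 1) PySem.Set.empty) (p.1 - 1))) swaps0
  let fuel := 1 + n.toNat * (2 * c.length)
  let st := (PySem.List.pyRange 0 n 1).foldl (fun st i =>
      if i ∈ st.1 then st
      else
        let r := bfsLoop (fun x => swaps.getD x PySem.Set.empty) fuel st.1 [i] 0
        (r.1, st.2 ++ [r.2]))
    ((PySem.Set.empty : PySem.Set Int), ([] : List Int))
  st.2.foldl (fun a s => PySem.Int.mod (a * PySem.Int.mod (pyFactorial s) 1000000007) 1000000007) 1

-- ===== PORT B =====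
-- one edge of B's loop: find the blocks of the two endpoints, merge them if distinct.
-- The `| _, _ => blocks` arm is Python's StopIteration (endpoint in no block): excluded by Pre_.
def mergeStep (blocks : List (List Int)) (p : Int × Int) : List (List Int) :=
  match blocks.find? (fun blk => decide ((p.1 - 1) ∈ blk)),
        blocks.find? (fun blk => decide ((p.2 - 1) ∈ blk)) with
  | some ba, some bb =>
      if ba ≠ bb then
        blocks.filter (fun blk => decide (blk ≠ ba ∧ blk ≠ bb)) ++ [ba ++ bb]
      else blocks
  | _, _ => blocks

def solution_alt (n : Int) (c : List (Int × Int)) : Int :=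
  -- blocks = [[i] for i in range(n)]; for u, v in c: merge the blocks of u-1 and v-1
  let blocks := c.foldl mergeStep ((PySem.List.pyRange 0 n 1).map (fun i => [i]))
  blocks.foldl (fun ans blk => PySem.Int.mod (ans * pyFactorial (blk.length : Int)) 1000000007) 1

-- ===== PRECONDITION & SPEC =====
-- Pre_ excludes exactly the inputs where A raises KeyError (and B StopIteration):
-- an edge endpoint outside 1..n
def Pre_solution (n : Int) (c : List (Int × Int)) : Prop :=
  ∀ p ∈ c, 1 ≤ p.1 ∧ p.1 ≤ n ∧ 1 ≤ p.2 ∧ p.2 ≤ n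
instance (n : Int) (c : List (Int × Int)) : Decidable (Pre_solution n c) := by
  unfold Pre_solution; infer_instance

def pvWitness_solution : Int × (List (Int × Int)) := (4, [(1, 2), (2, 2), (3, 4)])

def Spec_solution (n : Int) (c : List (Int × Int)) (out : Int) : Prop := out = solution_alt n c
instance (n : Int) (c : List (Int × Int)) (out : Int) : Decidable (Spec_solution n c out) := by
  unfold Spec_solution; infer_instance

-- ===== CLAIM (what is proved, stated in full; the proofs are below) =====
def Claim_equal_solution : Prop := ∀ (n : Int) (c : List (Int × Int)),
  Dom_solution n c → Pre_solution n c → Spec_solution n c (solution n c)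

-- ===== LEMMAS AND PROOFS =====

-- the closure of a worklist: x is added by the loop iff ReachP holds (predicate-level,
-- so that it is insensitive to the order and duplicates of the concrete worklist)
inductive ReachP (N : Int → List Int) (S : Int → Prop) (W : Int → Prop) : Int → Prop
  | base (x : Int) : W x → ¬ S x → ReachP N S W x
  | step (x y : Int) : ReachP N S W x → y ∈ N x → ¬ S y → ReachP N S W y

theorem reachP_congr {N : Int → List Int} {S S' W W' : Int → Prop}
    (hS : ∀ z, S z ↔ S' z) (hW : ∀ z, W z ↔ W' z) {x : Int} :
    ReachP N S W x ↔ ReachP N S' W' x := by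
  constructor
  · intro h; induction h with
    | base x hx hs => exact ReachP.base x ((hW x).mp hx) (fun h => hs ((hS x).mpr h))
    | step x y _ hy hs ih => exact ReachP.step x y ih hy (fun h => hs ((hS y).mpr h))
  · intro h; induction h with
    | base x hx hs => exact ReachP.base x ((hW x).mpr hx) (fun h => hs ((hS x).mp h))
    | step x y _ hy hs ih => exact ReachP.step x y ih hy (fun h => hs ((hS y).mp h))

theorem reachP_in {N : Int → List Int} {S W : Int → Prop} {R : Int → Prop}
    (hW : ∀ z, W z → R z) (hcl : ∀ a b, R a → b ∈ N a → R b) {x : Int}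
    (h : ReachP N S W x) : R x := by
  induction h with
  | base x hx _ => exact hW x hx
  | step x y _ hy _ ih => exact hcl x y ih hy

theorem reachP_empty {N : Int → List Int} {S : Int → Prop} {x : Int}
    (h : ReachP N S (fun _ => False) x) : False := by
  induction h with
  | base x hx _ => exact hx
  | step _ _ _ _ _ ih => exact ih

theorem reachP_pop_seen {N : Int → List Int} {S W : Int → Prop} {w : Int} (hw : S w) {x : Int} :
    ReachP N S (fun z => z = w ∨ W z) x ↔ ReachP N S W x := by
  constructor
  · intro h; induction h with
    | base x hx hs =>
        rcases hx with rfl | hx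
        · exact absurd hw hs
        · exact ReachP.base x hx hs
    | step x y _ hy hs ih => exact ReachP.step x y ih hy hs
  · intro h; induction h with
    | base x hx hs => exact ReachP.base x (Or.inr hx) hs
    | step x y _ hy hs ih => exact ReachP.step x y ih hy hs

theorem reachP_pop_new {N : Int → List Int} {S W : Int → Prop} {w : Int} (hw : ¬ S w) {x : Int} :
    ReachP N S (fun z => z = w ∨ W z) x ↔
      (x = w ∨ ReachP N (fun z => S z ∨ z = w) (fun z => W z ∨ z ∈ N w) x) := by
  constructor
  · intro h; induction h with
    | base x hx hs =>
        rcases hx with rfl | hx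
        · exact Or.inl rfl
        · by_cases hxw : x = w
          · exact Or.inl hxw
          · exact Or.inr (ReachP.base x (Or.inl hx) (by tauto))
    | step x y _ hy hs ih =>
        by_cases hyw : y = w
        · exact Or.inl hyw
        · rcases ih with rfl | ih
          · exact Or.inr (ReachP.base y (Or.inr hy) (by tauto))
          · exact Or.inr (ReachP.step x y ih hy (by tauto))
  · rintro (rfl | h)
    · exact ReachP.base x (Or.inl rfl) hw
    · induction h with
      | base x hx hs =>
          rcases hx with hx | hx
          · exact ReachP.base x (Or.inr hx) (by tauto)
          · exact ReachP.step w x (ReachP.base w (Or.inl rfl) hw) hx (by tauto)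
      | step x y _ hy hs ih => exact ReachP.step x y ih hy (by tauto)

-- one freshly seen element shrinks the unseen part of range(n) by exactly one
theorem filter_unseen_succ (rl seen : List Int) (w : Int) (hrl : rl.Nodup)
    (hw : w ∈ rl) (hns : w ∉ seen) :
    ((rl.filter fun z => decide (z ∉ seen ++ [w])).length) + 1 =
      ((rl.filter fun z => decide (z ∉ seen)).length) := by
  have h1 : (rl.filter fun z => decide (z ∉ seen ++ [w])) =
      (rl.filter fun z => decide (z ∉ seen)).filter (fun z => z != w) := by
    rw [List.filter_filter]
    apply List.filter_congr
    intro z _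
    by_cases h1 : z ∈ seen <;> by_cases h2 : z = w <;> simp [h1, h2]
  have hFnd : (rl.filter fun z => decide (z ∉ seen)).Nodup := hrl.filter _
  have hwF : w ∈ (rl.filter fun z => decide (z ∉ seen)) := by
    simp [List.mem_filter, hw, hns]
  have hpos : 0 < (rl.filter fun z => decide (z ∉ seen)).length :=
    List.length_pos_of_mem hwF
  rw [h1, ← List.Nodup.erase_eq_filter hFnd w, List.length_erase_of_mem hwF]
  omega

-- what A's while-loop computes: it adds exactly the ReachP-closure, in some order
theorem bfsLoop_char (N : Int → List Int) (n : Int) (K : Nat)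
    (hNr : ∀ x y, x ∈ PySem.List.pyRange 0 n 1 → y ∈ N x → y ∈ PySem.List.pyRange 0 n 1)
    (hK : ∀ x, x ∈ PySem.List.pyRange 0 n 1 → (N x).length ≤ K) :
    ∀ (fuel : Nat) (seen W : List Int) (cnt : Int), seen.Nodup →
      (∀ x ∈ W, x ∈ PySem.List.pyRange 0 n 1) →
      W.length + K * ((PySem.List.pyRange 0 n 1).filter fun z => decide (z ∉ seen)).length ≤ fuel →
      ∃ new : List Int,
        bfsLoop N fuel seen W cnt = (seen ++ new, cnt + new.length) ∧
        (seen ++ new).Nodup ∧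
        (∀ x, x ∈ new ↔ ReachP N (· ∈ seen) (· ∈ W) x) := by
  intro fuel
  induction fuel with
  | zero =>
      intro seen W cnt hnd hW hf
      cases W with
      | nil =>
          refine ⟨[], by simp [bfsLoop], by simpa using hnd, fun x => ?_⟩
          simp only [List.not_mem_nil, false_iff]
          exact fun h => reachP_empty h
      | cons w r => simp at hf
  | succ fuel ih =>
      intro seen W cnt hnd hW hf
      cases W with
      | nil =>
          refine ⟨[], by simp [bfsLoop], by simpa using hnd, fun x => ?_⟩
          simp only [List.not_mem_nil, false_iff]
          exact fun h => reachP_empty h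
      | cons box rest =>
          by_cases hb : box ∈ seen
          · have hstep : bfsLoop N (fuel + 1) seen (box :: rest) cnt
                = bfsLoop N fuel seen rest cnt := by
              simp [bfsLoop, hb]
            obtain ⟨new, heq, hnd', hmem⟩ := ih seen rest cnt hnd
              (fun x hx => hW x (List.mem_cons_of_mem _ hx))
              (by simp only [List.length_cons] at hf; omega)
            refine ⟨new, hstep ▸ heq, hnd', fun x => ?_⟩
            rw [hmem x, ← reachP_pop_seen (N := N) (W := (· ∈ rest)) hb]
            exact (reachP_congr (fun _ => Iff.rfl) (fun z => List.mem_cons)).symm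
          · have hbox : box ∈ PySem.List.pyRange 0 n 1 := hW box List.mem_cons_self
            have hadd : PySem.Set.add seen box = seen ++ [box] := PySem.Set.add_of_not_mem hb
            have hnd2 : (seen ++ [box]).Nodup := by
              rw [List.nodup_append]
              refine ⟨hnd, List.nodup_singleton _, ?_⟩
              intro a ha b hbmem heq
              rw [List.mem_singleton] at hbmem
              subst hbmem; subst heq
              exact hb ha
            have hfilter := filter_unseen_succ (PySem.List.pyRange 0 n 1) seen box
              (PySem.List.nodup_pyRange_one 0 n) hbox hb
            have hstep : bfsLoop N (fuel + 1) seen (box :: rest) cnt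
                = bfsLoop N fuel (seen ++ [box]) (rest ++ N box) (cnt + 1) := by
              simp only [bfsLoop, if_neg hb, hadd]
            obtain ⟨new, heq, hnd', hmem⟩ := ih (seen ++ [box]) (rest ++ N box) (cnt + 1) hnd2
              (by
                intro x hx
                rcases List.mem_append.mp hx with hx | hx
                · exact hW x (List.mem_cons_of_mem _ hx)
                · exact hNr box x hbox hx)
              (by
                have hKb := hK box hbox
                rw [← hfilter, Nat.mul_add] at hf
                simp only [List.length_cons, List.length_append] at hf ⊢
                omega)
            refine ⟨box :: new, ?_, ?_, fun x => ?_⟩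
            · rw [hstep, heq]
              refine Prod.ext ?_ ?_
              · simp
              · simp only [List.length_cons]
                push_cast
                ring
            · simpa [List.append_assoc] using hnd'
            · have h1 : ∀ z : Int, z ∈ seen ++ [box] ↔ (z ∈ seen ∨ z = box) := by
                intro z; simp
              have h2 : ∀ z : Int, z ∈ rest ++ N box ↔ (z ∈ rest ∨ z ∈ N box) := by
                intro z; simp
              rw [List.mem_cons, hmem x,
                reachP_congr (S' := fun z => z ∈ seen ∨ z = box)
                  (W' := fun z => z ∈ rest ∨ z ∈ N box) h1 h2,
                ← reachP_pop_new (N := N) hb]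
              exact (reachP_congr (fun _ => Iff.rfl) (fun z => List.mem_cons)).symm

-- proof-side names for the two ports' loop bodies (each is definitionally its port's lambda)
def edgeRel (c : List (Int × Int)) (x y : Int) : Prop :=
  ∃ p ∈ c, (p.1 - 1 = x ∧ p.2 - 1 = y) ∨ (p.2 - 1 = x ∧ p.1 - 1 = y)

def stepA (d : PySem.Dict Int (PySem.Set Int)) (p : Int × Int) : PySem.Dict Int (PySem.Set Int) :=
  let d1 := d.insert (p.1 - 1) (PySem.Set.add (d.getD (p.1 - 1) PySem.Set.empty) (p.2 - 1))
  d1.insert (p.2 - 1) (PySem.Set.add (d1.getD (p.2 - 1) PySem.Set.empty) (p.1 - 1))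

def buildA (n : Int) (c : List (Int × Int)) : PySem.Dict Int (PySem.Set Int) :=
  c.foldl stepA
    ((PySem.List.pyRange 0 n 1).foldl (fun d i => d.insert i PySem.Set.empty) PySem.Dict.empty)

def NAfun (n : Int) (c : List (Int × Int)) : Int → List Int :=
  fun x => (buildA n c).getD x PySem.Set.empty

def gMul (a s : Int) : Int := PySem.Int.mod (a * pyFactorial s) 1000000007
def fMul (a s : Int) : Int :=
  PySem.Int.mod (a * PySem.Int.mod (pyFactorial s) 1000000007) 1000000007

def outerA (N : Int → List Int) (fuel : Nat) :
    (PySem.Set Int × List Int) → Int → (PySem.Set Int × List Int) := fun st i =>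
  if i ∈ st.1 then st
  else ((bfsLoop N fuel st.1 [i] 0).1, st.2 ++ [(bfsLoop N fuel st.1 [i] 0).2])

theorem solution_eq (n : Int) (c : List (Int × Int)) : solution n c =
    ((PySem.List.pyRange 0 n 1).foldl (outerA (NAfun n c) (1 + n.toNat * (2 * c.length)))
      (PySem.Set.empty, [])).2.foldl fMul 1 := rfl

theorem solution_alt_eq (n : Int) (c : List (Int × Int)) : solution_alt n c =
    (c.foldl mergeStep ((PySem.List.pyRange 0 n 1).map (fun i => [i]))).foldl
      (fun ans blk => gMul ans (blk.length : Int)) 1 := rfl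

-- adjacency characterizations: A's neighbour structure holds y next to x iff some edge says so
theorem edgeRel_nil (x y : Int) : ¬ edgeRel [] x y := by
  simp [edgeRel]

theorem edgeRel_cons (p : Int × Int) (l : List (Int × Int)) (x y : Int) :
    edgeRel (p :: l) x y ↔
      (((p.1 - 1 = x ∧ p.2 - 1 = y) ∨ (p.2 - 1 = x ∧ p.1 - 1 = y)) ∨ edgeRel l x y) := by
  simp [edgeRel, List.mem_cons, or_and_right, exists_or]

theorem initA_getD (l : List Int) :
    ∀ (d : PySem.Dict Int (PySem.Set Int)),
      (∀ x, d.getD x PySem.Set.empty = PySem.Set.empty) →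
      ∀ x, (l.foldl (fun d i => d.insert i PySem.Set.empty) d).getD x PySem.Set.empty
        = PySem.Set.empty := by
  induction l with
  | nil => intro d h x; exact h x
  | cons i l ih =>
      intro d h x
      refine ih _ (fun z => ?_) x
      rw [PySem.Dict.getD_insert]
      split
      · rfl
      · exact h z

theorem stepA_mem (d : PySem.Dict Int (PySem.Set Int)) (p : Int × Int) (x y : Int) :
    y ∈ (stepA d p).getD x PySem.Set.empty ↔
      (y ∈ d.getD x PySem.Set.empty ∨
        ((p.1 - 1 = x ∧ p.2 - 1 = y) ∨ (p.2 - 1 = x ∧ p.1 - 1 = y))) := by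
  simp only [stepA]
  rw [PySem.Dict.getD_insert]
  by_cases h2 : x = p.2 - 1
  · rw [if_pos h2, PySem.Set.mem_add, PySem.Dict.getD_insert]
    by_cases h1 : p.2 - 1 = p.1 - 1
    · rw [if_pos h1, PySem.Set.mem_add]
      subst h2
      constructor
      · rintro ((h | h) | h)
        · left; rw [h1]; exact h
        · right; left; omega
        · right; right; omega
      · rintro (h | ⟨h, h'⟩ | ⟨h, h'⟩)
        · left; left; rw [← h1]; exact h
        · right; omega
        · left; right; omega
    · rw [if_neg h1]
      subst h2
      constructor
      · rintro (h | h)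
        · left; exact h
        · right; right; omega
      · rintro (h | ⟨h, h'⟩ | ⟨h, h'⟩)
        · left; exact h
        · omega
        · right; omega
  · rw [if_neg h2, PySem.Dict.getD_insert]
    by_cases h1 : x = p.1 - 1
    · rw [if_pos h1, PySem.Set.mem_add]
      subst h1
      constructor
      · rintro (h | h)
        · left; exact h
        · right; left; omega
      · rintro (h | ⟨h, h'⟩ | ⟨h, h'⟩)
        · left; exact h
        · right; omega
        · omega
    · rw [if_neg h1]
      constructor
      · exact fun h => Or.inl h
      · rintro (h | ⟨h, h'⟩ | ⟨h, h'⟩)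
        · exact h
        · omega
        · omega

theorem buildA_mem_fold :
    ∀ (l : List (Int × Int)) (d : PySem.Dict Int (PySem.Set Int)) (P : Int → Int → Prop),
      (∀ x y, (y ∈ d.getD x PySem.Set.empty) ↔ P x y) →
      ∀ x y, (y ∈ (l.foldl stepA d).getD x PySem.Set.empty) ↔ (P x y ∨ edgeRel l x y) := by
  intro l
  induction l with
  | nil =>
      intro d P h x y
      simp only [List.foldl_nil, h x y]
      exact ⟨Or.inl, fun h' => h'.elim id (fun h'' => absurd h'' (edgeRel_nil x y))⟩
  | cons p l ih =>
      intro d P h x y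
      rw [List.foldl_cons]
      have hstep : ∀ x y, (y ∈ (stepA d p).getD x PySem.Set.empty) ↔
          (P x y ∨ ((p.1 - 1 = x ∧ p.2 - 1 = y) ∨ (p.2 - 1 = x ∧ p.1 - 1 = y))) := by
        intro x y
        rw [stepA_mem, h x y]
      rw [ih (stepA d p) _ hstep x y, edgeRel_cons]
      tauto

theorem buildA_mem (n : Int) (c : List (Int × Int)) (x y : Int) :
    y ∈ NAfun n c x ↔ edgeRel c x y := by
  unfold NAfun buildA
  rw [buildA_mem_fold c _ (fun _ _ => False) ?_ x y]
  · tauto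
  · intro x y
    rw [initA_getD _ _ (fun z => PySem.Dict.getD_empty z _) x]
    simp [PySem.Set.empty]

theorem length_set_add (s : PySem.Set Int) (y : Int) :
    (PySem.Set.add s y).length ≤ s.length + 1 := by
  rw [PySem.Set.add_eq_ite]
  split <;> simp

theorem stepA_len (d : PySem.Dict Int (PySem.Set Int)) (p : Int × Int) (x : Int) :
    ((stepA d p).getD x PySem.Set.empty).length ≤ (d.getD x PySem.Set.empty).length + 2 := by
  simp only [stepA]
  rw [PySem.Dict.getD_insert]
  by_cases h2 : x = p.2 - 1
  · rw [if_pos h2, PySem.Dict.getD_insert]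
    by_cases h1 : p.2 - 1 = p.1 - 1
    · rw [if_pos h1]
      subst h2
      rw [h1]
      have l1 := length_set_add (d.getD (p.1 - 1) PySem.Set.empty) (p.1 - 1)
      have l2 := length_set_add (PySem.Set.add (d.getD (p.1 - 1) PySem.Set.empty) (p.1 - 1)) (p.1 - 1)
      omega
    · rw [if_neg h1]
      subst h2
      have := length_set_add (d.getD (p.2 - 1) PySem.Set.empty) (p.1 - 1)
      omega
  · rw [if_neg h2, PySem.Dict.getD_insert]
    by_cases h1 : x = p.1 - 1
    · rw [if_pos h1]
      subst h1
      have := length_set_add (d.getD (p.1 - 1) PySem.Set.empty) (p.2 - 1)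
      omega
    · rw [if_neg h1]
      omega

theorem buildA_len_fold :
    ∀ (l : List (Int × Int)) (d : PySem.Dict Int (PySem.Set Int)) (x : Int),
      ((l.foldl stepA d).getD x PySem.Set.empty).length
        ≤ (d.getD x PySem.Set.empty).length + 2 * l.length := by
  intro l
  induction l with
  | nil => intro d x; simp
  | cons p l ih =>
      intro d x
      rw [List.foldl_cons]
      have h1 := ih (stepA d p) x
      have h2 := stepA_len d p x
      simp only [List.length_cons]
      omega

theorem buildA_len (n : Int) (c : List (Int × Int)) (x : Int) :
    (NAfun n c x).length ≤ 2 * c.length := by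
  unfold NAfun buildA
  have h := buildA_len_fold c
    ((PySem.List.pyRange 0 n 1).foldl (fun d i => d.insert i PySem.Set.empty) PySem.Dict.empty) x
  rw [initA_getD _ _ (fun z => PySem.Dict.getD_empty z _) x] at h
  simpa [PySem.Set.empty] using h

theorem edgeRel_range (n : Int) (c : List (Int × Int))
    (hpre : ∀ p ∈ c, 1 ≤ p.1 ∧ p.1 ≤ n ∧ 1 ≤ p.2 ∧ p.2 ≤ n)
    {x y : Int} (h : edgeRel c x y) :
    x ∈ PySem.List.pyRange 0 n 1 ∧ y ∈ PySem.List.pyRange 0 n 1 := by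
  obtain ⟨p, hp, hc⟩ := h
  have := hpre p hp
  rcases hc with ⟨rfl, rfl⟩ | ⟨rfl, rfl⟩ <;>
    constructor <;> rw [PySem.List.mem_pyRange_one] <;> omega

theorem fMul_eq_gMul (a s : Int) : fMul a s = gMul a s := by
  unfold fMul gMul
  rw [PySem.Int.mod_eq_emod_of_pos (by norm_num), PySem.Int.mod_eq_emod_of_pos (by norm_num),
    PySem.Int.mod_eq_emod_of_pos (by norm_num)]
  rw [Int.mul_emod a (pyFactorial s % 1000000007), Int.emod_emod_of_dvd _ dvd_rfl,
    ← Int.mul_emod]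

-- ===== connectivity: the reflexive-transitive closure of the (symmetric) edge relation =====
def Conn (c : List (Int × Int)) (x y : Int) : Prop := Relation.ReflTransGen (edgeRel c) x y

theorem edgeRel_symm {c : List (Int × Int)} {x y : Int} (h : edgeRel c x y) : edgeRel c y x := by
  obtain ⟨p, hp, hc⟩ := h
  exact ⟨p, hp, hc.elim (fun h' => Or.inr ⟨h'.2, h'.1⟩) (fun h' => Or.inl ⟨h'.2, h'.1⟩)⟩

theorem conn_symm {c : List (Int × Int)} {x y : Int} (h : Conn c x y) : Conn c y x := by
  induction h with
  | refl => exact Relation.ReflTransGen.refl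
  | tail _ e ih => exact Relation.ReflTransGen.head (edgeRel_symm e) ih

theorem conn_empty {x y : Int} : Conn [] x y ↔ x = y := by
  constructor
  · intro h
    induction h with
    | refl => rfl
    | tail _ e _ => exact absurd e (edgeRel_nil _ _)
  · rintro rfl; exact Relation.ReflTransGen.refl

theorem edgeRel_append_single (l : List (Int × Int)) (p : Int × Int) (x y : Int) :
    edgeRel (l ++ [p]) x y ↔
      (edgeRel l x y ∨ ((p.1 - 1 = x ∧ p.2 - 1 = y) ∨ (p.2 - 1 = x ∧ p.1 - 1 = y))) := by
  simp [edgeRel, List.mem_append, or_and_right, exists_or]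

theorem conn_append_of {l : List (Int × Int)} (p : Int × Int) {x y : Int}
    (h : Conn l x y) : Conn (l ++ [p]) x y :=
  Relation.ReflTransGen.mono
    (fun a b e => (edgeRel_append_single l p a b).mpr (Or.inl e)) h

theorem conn_single_new (l : List (Int × Int)) (p : Int × Int) :
    Conn (l ++ [p]) (p.1 - 1) (p.2 - 1) :=
  Relation.ReflTransGen.single ((edgeRel_append_single l p _ _).mpr (Or.inr (Or.inl ⟨rfl, rfl⟩)))

theorem conn_append_single (l : List (Int × Int)) (p : Int × Int) (x y : Int) :
    Conn (l ++ [p]) x y ↔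
      (Conn l x y ∨ (Conn l x (p.1 - 1) ∧ Conn l (p.2 - 1) y) ∨
        (Conn l x (p.2 - 1) ∧ Conn l (p.1 - 1) y)) := by
  constructor
  · intro h
    induction h with
    | refl => exact Or.inl Relation.ReflTransGen.refl
    | tail _ e ih =>
        rcases (edgeRel_append_single l p _ _).mp e with he | ⟨ha, hb⟩ | ⟨hb, ha⟩
        · rcases ih with h1 | ⟨h1, h2⟩ | ⟨h1, h2⟩
          · exact Or.inl (h1.tail he)
          · exact Or.inr (Or.inl ⟨h1, h2.tail he⟩)
          · exact Or.inr (Or.inr ⟨h1, h2.tail he⟩)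
        · subst ha; subst hb
          rcases ih with h1 | ⟨h1, _⟩ | ⟨h1, _⟩
          · exact Or.inr (Or.inl ⟨h1, Relation.ReflTransGen.refl⟩)
          · exact Or.inr (Or.inl ⟨h1, Relation.ReflTransGen.refl⟩)
          · exact Or.inl h1
        · subst ha; subst hb
          rcases ih with h1 | ⟨h1, _⟩ | ⟨h1, _⟩
          · exact Or.inr (Or.inr ⟨h1, Relation.ReflTransGen.refl⟩)
          · exact Or.inl h1
          · exact Or.inr (Or.inr ⟨h1, Relation.ReflTransGen.refl⟩)
  · rintro (h | ⟨h1, h2⟩ | ⟨h1, h2⟩)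
    · exact conn_append_of p h
    · exact ((conn_append_of p h1).trans (conn_single_new l p)).trans (conn_append_of p h2)
    · exact ((conn_append_of p h1).trans (conn_symm (conn_single_new l p))).trans
        (conn_append_of p h2)

-- what a BFS started at an unseen i from an edge-closed seen set collects: exactly i's class
theorem reachP_class (c : List (Int × Int)) (N : Int → List Int)
    (hN : ∀ x y, y ∈ N x ↔ edgeRel c x y)
    (S : Int → Prop) (hS : ∀ s y, S s → edgeRel c s y → S y)
    (i : Int) (hi : ¬ S i) (x : Int) :
    ReachP N S (· ∈ [i]) x ↔ Conn c i x := by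
  constructor
  · intro h
    induction h with
    | base x hx _ =>
        rw [List.mem_singleton] at hx
        subst hx; exact Relation.ReflTransGen.refl
    | step x y _ hy _ ih => exact ih.tail ((hN x y).mp hy)
  · intro h
    have key : ∀ z, Conn c i z → (¬ S z ∧ ReachP N S (· ∈ [i]) z) := by
      intro z hz
      induction hz with
      | refl => exact ⟨hi, ReachP.base i (List.mem_singleton.mpr rfl) hi⟩
      | tail _ e ih =>
          rename_i u v _
          have hv : ¬ S v := fun hvS => ih.1 (hS v u hvS (edgeRel_symm e))
          exact ⟨hv, ReachP.step u v ih.2 ((hN u v).mpr e) hv⟩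
    exact (key x h).2

-- blocks of a pairwise-disjoint family sharing an element are the same block
theorem block_eq_of_mem {blocks : List (List Int)}
    (hpw : blocks.Pairwise (fun b1 b2 => ∀ x ∈ b1, x ∉ b2))
    {b1 b2 : List Int} (h1 : b1 ∈ blocks) (h2 : b2 ∈ blocks) {x : Int}
    (hx1 : x ∈ b1) (hx2 : x ∈ b2) : b1 = b2 := by
  induction blocks with
  | nil => cases h1
  | cons hd tl ih =>
      rcases List.pairwise_cons.mp hpw with ⟨hhd, htl⟩
      cases List.mem_cons.mp h1 with
      | inl h1e =>
          cases List.mem_cons.mp h2 with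
          | inl h2e => rw [h1e, h2e]
          | inr h2m => exact absurd hx2 (hhd b2 h2m x (h1e ▸ hx1))
      | inr h1m =>
          cases List.mem_cons.mp h2 with
          | inl h2e => exact absurd hx1 (hhd b1 h1m x (h2e ▸ hx2))
          | inr h2m => exact ih htl h1m h2m

-- "comps is a family of connectivity classes": disjoint, nodup, nonempty, each block the
-- exact Conn-class of each of its members
def GoodComps (c : List (Int × Int)) (comps : List (List Int)) : Prop :=
  comps.Pairwise (fun b1 b2 => ∀ x ∈ b1, x ∉ b2) ∧
  (∀ b ∈ comps, b.Nodup ∧ b ≠ []) ∧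
  (∀ b ∈ comps, ∀ r ∈ b, ∀ x, x ∈ b ↔ Conn c r x)

-- ===== B-side: the partition-merge loop maintains a GoodComps cover of range(n) =====
def IsPart (n : Int) (l : List (Int × Int)) (blocks : List (List Int)) : Prop :=
  (∀ x, x ∈ PySem.List.pyRange 0 n 1 ↔ ∃ blk ∈ blocks, x ∈ blk) ∧ GoodComps l blocks

theorem isPart_init (n : Int) : IsPart n [] ((PySem.List.pyRange 0 n 1).map (fun i => [i])) := by
  refine ⟨?_, ?_, ?_, ?_⟩
  · intro x
    simp only [List.mem_map]
    constructor
    · intro hx; exact ⟨[x], ⟨x, hx, rfl⟩, List.mem_singleton.mpr rfl⟩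
    · rintro ⟨blk, ⟨i, hi, rfl⟩, hx⟩
      rw [List.mem_singleton] at hx; subst hx; exact hi
  · rw [List.pairwise_map]
    refine List.Pairwise.imp ?_ (PySem.List.nodup_pyRange_one 0 n)
    intro a b hne x hx1 hx2
    rw [List.mem_singleton] at hx1 hx2
    exact hne (hx1 ▸ hx2)
  · rintro blk hblk
    rcases List.mem_map.mp hblk with ⟨i, _, rfl⟩
    exact ⟨List.nodup_singleton _, by simp⟩
  · rintro blk hblk r hr x
    rcases List.mem_map.mp hblk with ⟨i, _, rfl⟩
    rw [List.mem_singleton] at hr ⊢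
    subst hr
    rw [conn_empty]
    exact ⟨fun h => h.symm ▸ rfl, fun h => h.symm⟩

theorem isPart_step (n : Int) (l : List (Int × Int)) (p : Int × Int)
    (hp : 1 ≤ p.1 ∧ p.1 ≤ n ∧ 1 ≤ p.2 ∧ p.2 ≤ n)
    (blocks : List (List Int)) (h : IsPart n l blocks) :
    IsPart n (l ++ [p]) (mergeStep blocks p) := by
  obtain ⟨hcov, hpw, hndne, hcls⟩ := h
  have ha : p.1 - 1 ∈ PySem.List.pyRange 0 n 1 := by
    rw [PySem.List.mem_pyRange_one]; omega
  have hbr : p.2 - 1 ∈ PySem.List.pyRange 0 n 1 := by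
    rw [PySem.List.mem_pyRange_one]; omega
  obtain ⟨Ba0, hBa0, haBa0⟩ := (hcov _).mp ha
  obtain ⟨Bb0, hBb0, hbBb0⟩ := (hcov _).mp hbr
  have hfa : ∃ ba, blocks.find? (fun blk => decide ((p.1 - 1) ∈ blk)) = some ba := by
    cases hf : blocks.find? (fun blk => decide ((p.1 - 1) ∈ blk)) with
    | none =>
        have := List.find?_eq_none.mp hf Ba0 hBa0
        simp only [decide_eq_true_eq] at this
        exact absurd haBa0 this
    | some ba => exact ⟨ba, rfl⟩
  have hfb : ∃ bb, blocks.find? (fun blk => decide ((p.2 - 1) ∈ blk)) = some bb := by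
    cases hf : blocks.find? (fun blk => decide ((p.2 - 1) ∈ blk)) with
    | none =>
        have := List.find?_eq_none.mp hf Bb0 hBb0
        simp only [decide_eq_true_eq] at this
        exact absurd hbBb0 this
    | some bb => exact ⟨bb, rfl⟩
  obtain ⟨ba, hfa⟩ := hfa
  obtain ⟨bb, hfb⟩ := hfb
  have hbamem : ba ∈ blocks := List.mem_of_find?_eq_some hfa
  have hbbmem : bb ∈ blocks := List.mem_of_find?_eq_some hfb
  have haba : p.1 - 1 ∈ ba := by
    have := List.find?_some hfa; simpa using this
  have hbbb : p.2 - 1 ∈ bb := by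
    have := List.find?_some hfb; simpa using this
  have hconn_a : ∀ x, x ∈ ba ↔ Conn l (p.1 - 1) x := hcls ba hbamem _ haba
  have hconn_b : ∀ x, x ∈ bb ↔ Conn l (p.2 - 1) x := hcls bb hbbmem _ hbbb
  by_cases hbe : ba = bb
  · -- endpoints already in the same block: no merge, same classes
    have hms : mergeStep blocks p = blocks := by
      unfold mergeStep
      rw [hfa, hfb]
      simp [hbe]
    rw [hms]
    have hab : Conn l (p.1 - 1) (p.2 - 1) := (hconn_a _).mp (hbe ▸ hbbb)
    refine ⟨hcov, hpw, hndne, ?_⟩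
    intro blk hblk r hr x
    rw [hcls blk hblk r hr x, conn_append_single]
    constructor
    · exact Or.inl
    · rintro (h1 | ⟨h1, h2⟩ | ⟨h1, h2⟩)
      · exact h1
      · exact (h1.trans hab).trans h2
      · exact (h1.trans (conn_symm hab)).trans h2
  · -- distinct blocks: they are replaced by their union
    have hms : mergeStep blocks p =
        blocks.filter (fun blk => decide (blk ≠ ba ∧ blk ≠ bb)) ++ [ba ++ bb] := by
      unfold mergeStep
      rw [hfa, hfb]
      simp [hbe]
    rw [hms]
    have hbnotba : p.2 - 1 ∉ ba := fun hx => hbe (block_eq_of_mem hpw hbamem hbbmem hx hbbb)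
    have hanotbb : p.1 - 1 ∉ bb := fun hx => hbe (block_eq_of_mem hpw hbamem hbbmem haba hx)
    have hmf : ∀ blk, blk ∈ blocks.filter (fun blk => decide (blk ≠ ba ∧ blk ≠ bb)) ↔
        (blk ∈ blocks ∧ blk ≠ ba ∧ blk ≠ bb) := by
      intro blk; simp [List.mem_filter]
    -- the union block is exactly the new class of p.1 - 1
    have hN1 : ∀ x, x ∈ ba ++ bb ↔ Conn (l ++ [p]) (p.1 - 1) x := by
      intro x
      rw [List.mem_append, hconn_a x, hconn_b x, conn_append_single]
      constructor
      · rintro (h1 | h1)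
        · exact Or.inl h1
        · exact Or.inr (Or.inl ⟨Relation.ReflTransGen.refl, h1⟩)
      · rintro (h1 | ⟨_, h2⟩ | ⟨h1, _⟩)
        · exact Or.inl h1
        · exact Or.inr h2
        · exact absurd ((hconn_a _).mpr h1) hbnotba
    refine ⟨?_, ?_, ?_, ?_⟩
    · -- cover
      intro x
      rw [hcov x]
      constructor
      · rintro ⟨blk, hblk, hxblk⟩
        by_cases h1 : blk = ba
        · exact ⟨ba ++ bb, List.mem_append_right _ (List.mem_singleton.mpr rfl),
            List.mem_append_left _ (h1 ▸ hxblk)⟩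
        by_cases h2 : blk = bb
        · exact ⟨ba ++ bb, List.mem_append_right _ (List.mem_singleton.mpr rfl),
            List.mem_append_right _ (h2 ▸ hxblk)⟩
        · exact ⟨blk, List.mem_append_left _ ((hmf blk).mpr ⟨hblk, h1, h2⟩), hxblk⟩
      · rintro ⟨blk, hblk, hxblk⟩
        rcases List.mem_append.mp hblk with hblk | hblk
        · exact ⟨blk, ((hmf blk).mp hblk).1, hxblk⟩
        · rw [List.mem_singleton] at hblk; subst hblk
          rcases List.mem_append.mp hxblk with hx | hx
          · exact ⟨ba, hbamem, hx⟩
          · exact ⟨bb, hbbmem, hx⟩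
    · -- pairwise disjoint
      rw [List.pairwise_append]
      refine ⟨hpw.sublist List.filter_sublist, List.pairwise_singleton _ _, ?_⟩
      intro blk hblk b' hb' x hxblk hxb'
      rw [List.mem_singleton] at hb'; subst hb'
      obtain ⟨hblkmem, hne_a, hne_b⟩ := (hmf blk).mp hblk
      rcases List.mem_append.mp hxb' with hx | hx
      · exact hne_a (block_eq_of_mem hpw hblkmem hbamem hxblk hx)
      · exact hne_b (block_eq_of_mem hpw hblkmem hbbmem hxblk hx)
    · -- nodup ∧ nonempty
      intro blk hblk
      rcases List.mem_append.mp hblk with hblk | hblk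
      · exact hndne blk ((hmf blk).mp hblk).1
      · rw [List.mem_singleton] at hblk; subst hblk
        refine ⟨List.Nodup.append (hndne ba hbamem).1 (hndne bb hbbmem).1 ?_, ?_⟩
        · intro x hx1 hx2
          exact hbe (block_eq_of_mem hpw hbamem hbbmem hx1 hx2)
        · intro hc
          exact (hndne ba hbamem).2 (List.append_eq_nil_iff.mp hc).1
    · -- each block is the exact class of each of its members
      intro blk hblk r hr x
      rcases List.mem_append.mp hblk with hblk | hblk
      · obtain ⟨hblkmem, hne_a, hne_b⟩ := (hmf blk).mp hblk
        rw [hcls blk hblkmem r hr x, conn_append_single]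
        constructor
        · exact Or.inl
        · rintro (h1 | ⟨h1, h2⟩ | ⟨h1, h2⟩)
          · exact h1
          · exact absurd (block_eq_of_mem hpw hblkmem hbamem
              ((hcls blk hblkmem r hr _).mpr h1) haba) hne_a
          · exact absurd (block_eq_of_mem hpw hblkmem hbbmem
              ((hcls blk hblkmem r hr _).mpr h1) hbbb) hne_b
      · rw [List.mem_singleton] at hblk; subst hblk
        have hra : Conn (l ++ [p]) (p.1 - 1) r := (hN1 r).mp hr
        rw [hN1 x]
        exact ⟨fun hx => (conn_symm hra).trans hx, fun hx => hra.trans hx⟩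

theorem isPart_fold (n : Int) :
    ∀ (rest l : List (Int × Int)) (blocks : List (List Int)),
      (∀ p ∈ rest, 1 ≤ p.1 ∧ p.1 ≤ n ∧ 1 ≤ p.2 ∧ p.2 ≤ n) →
      IsPart n l blocks → IsPart n (l ++ rest) (rest.foldl mergeStep blocks) := by
  intro rest
  induction rest with
  | nil => intro l blocks _ h; simpa using h
  | cons p rest ih =>
      intro l blocks hpre h
      rw [List.foldl_cons, show l ++ p :: rest = (l ++ [p]) ++ rest by simp]
      exact ih (l ++ [p]) _ (fun q hq => hpre q (List.mem_cons_of_mem _ hq))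
        (isPart_step n l p (hpre p List.mem_cons_self) blocks h)

-- ===== A-side: the outer loop maintains a GoodComps decomposition of the seen set =====
def AInv (n : Int) (c : List (Int × Int)) (done : List Int)
    (st : PySem.Set Int × List Int) : Prop :=
  ∃ comps : List (List Int), GoodComps c comps ∧
    (∀ x, x ∈ st.1 ↔ ∃ b ∈ comps, x ∈ b) ∧
    st.2 = comps.map (fun b => (b.length : Int)) ∧
    st.1.Nodup ∧
    (∀ x ∈ st.1, x ∈ PySem.List.pyRange 0 n 1) ∧
    (∀ i ∈ done, i ∈ st.1)

theorem aFold (n : Int) (c : List (Int × Int))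
    (hpre : ∀ p ∈ c, 1 ≤ p.1 ∧ p.1 ≤ n ∧ 1 ≤ p.2 ∧ p.2 ≤ n)
    (N : Int → List Int) (hN : ∀ x y, y ∈ N x ↔ edgeRel c x y)
    (hK : ∀ x, (N x).length ≤ 2 * c.length) (fuel : Nat)
    (hfuel : 1 + 2 * c.length * (PySem.List.pyRange 0 n 1).length ≤ fuel) :
    ∀ (todo done : List Int), (∀ i ∈ todo, i ∈ PySem.List.pyRange 0 n 1) →
    ∀ st, AInv n c done st →
      AInv n c (done ++ todo) (todo.foldl (outerA N fuel) st) := by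
  intro todo
  induction todo with
  | nil => intro done _ st h; simpa using h
  | cons i todo ih =>
      intro done htodo st hst
      rw [List.foldl_cons, show done ++ i :: todo = (done ++ [i]) ++ todo by simp]
      have hi : i ∈ PySem.List.pyRange 0 n 1 := htodo i List.mem_cons_self
      obtain ⟨comps, hg, hcov, hsz, hnd, hsub, hdone⟩ := hst
      by_cases hmem : i ∈ st.1
      · rw [show outerA N fuel st i = st from by simp [outerA, hmem]]
        refine ih (done ++ [i]) (fun j hj => htodo j (List.mem_cons_of_mem _ hj)) st
          ⟨comps, hg, hcov, hsz, hnd, hsub, ?_⟩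
        intro j hj
        rcases List.mem_append.mp hj with hj | hj
        · exact hdone j hj
        · rw [List.mem_singleton] at hj; exact hj ▸ hmem
      · have hNr : ∀ x y, x ∈ PySem.List.pyRange 0 n 1 → y ∈ N x →
            y ∈ PySem.List.pyRange 0 n 1 :=
          fun x y _ hy => (edgeRel_range n c hpre ((hN x y).mp hy)).2
        have hW1 : ∀ x ∈ [i], x ∈ PySem.List.pyRange 0 n 1 := by
          intro x hx; rw [List.mem_singleton] at hx; exact hx ▸ hi
        have hfA : [i].length + 2 * c.length * ((PySem.List.pyRange 0 n 1).filter
            fun z => decide (z ∉ st.1)).length ≤ fuel := by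
          have hle := List.length_filter_le (fun z => decide (z ∉ st.1))
            (PySem.List.pyRange 0 n 1)
          have hm := Nat.mul_le_mul_left (2 * c.length) hle
          simp only [List.length_cons, List.length_nil]
          omega
        obtain ⟨new, heq, hnd', hmemnew⟩ := bfsLoop_char N n (2 * c.length) hNr
          (fun x _ => hK x) fuel st.1 [i] 0 hnd hW1 hfA
        have hS : ∀ s y, s ∈ st.1 → edgeRel c s y → y ∈ st.1 := by
          intro s y hs he
          obtain ⟨b, hb, hsb⟩ := (hcov s).mp hs
          exact (hcov y).mpr ⟨b, hb, (hg.2.2 b hb s hsb y).mpr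
            (Relation.ReflTransGen.single he)⟩
        have hclass : ∀ x, x ∈ new ↔ Conn c i x := by
          intro x
          rw [hmemnew x]
          exact reachP_class c N hN (· ∈ st.1) hS i hmem x
        have hiNew : i ∈ new := (hclass i).mpr Relation.ReflTransGen.refl
        have hdisj := List.nodup_append.mp hnd'
        have hnewsub : ∀ x ∈ new, x ∈ PySem.List.pyRange 0 n 1 := by
          intro x hx
          exact reachP_in hW1 hNr ((hmemnew x).mp hx)
        rw [show outerA N fuel st i = (st.1 ++ new, st.2 ++ [(0 : Int) + new.length]) from by
          simp only [outerA, if_neg hmem]; rw [heq]]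
        refine ih (done ++ [i]) (fun j hj => htodo j (List.mem_cons_of_mem _ hj)) _
          ⟨comps ++ [new], ⟨?_, ?_, ?_⟩, ?_, ?_, hnd', ?_, ?_⟩
        · rw [List.pairwise_append]
          refine ⟨hg.1, List.pairwise_singleton _ _, ?_⟩
          intro b hb b' hb' x hxb hxb'
          rw [List.mem_singleton] at hb'
          subst hb'
          exact hdisj.2.2 x ((hcov x).mpr ⟨b, hb, hxb⟩) x hxb' rfl
        · intro b hb
          rcases List.mem_append.mp hb with hb | hb
          · exact hg.2.1 b hb
          · rw [List.mem_singleton] at hb; subst hb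
            exact ⟨hdisj.2.1, List.ne_nil_of_mem hiNew⟩
        · intro b hb r hr x
          rcases List.mem_append.mp hb with hb | hb
          · exact hg.2.2 b hb r hr x
          · rw [List.mem_singleton] at hb; subst hb
            have hir : Conn c i r := (hclass r).mp hr
            rw [hclass x]
            exact ⟨fun hx => (conn_symm hir).trans hx, fun hx => hir.trans hx⟩
        · intro x
          constructor
          · intro hx
            rcases List.mem_append.mp hx with hx | hx
            · obtain ⟨b, hb, hxb⟩ := (hcov x).mp hx
              exact ⟨b, List.mem_append_left _ hb, hxb⟩
            · exact ⟨new, List.mem_append_right _ (List.mem_singleton.mpr rfl), hx⟩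
          · rintro ⟨b, hb, hxb⟩
            rcases List.mem_append.mp hb with hb | hb
            · exact List.mem_append_left _ ((hcov x).mpr ⟨b, hb, hxb⟩)
            · rw [List.mem_singleton] at hb; subst hb
              exact List.mem_append_right _ hxb
        · rw [List.map_append, hsz]; simp
        · intro x hx
          rcases List.mem_append.mp hx with hx | hx
          · exact hsub x hx
          · exact hnewsub x hx
        · intro j hj
          rcases List.mem_append.mp hj with hj | hj
          · exact List.mem_append_left _ (hdone j hj)
          · rw [List.mem_singleton] at hj; subst hj
            exact List.mem_append_right _ hiNew

-- ===== bridge: two GoodComps covers of range(n) have the same multiset of sizes =====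
-- each block of one cover appears, as a finset, among the blocks of the other
theorem class_finset_mem (n : Int) (c : List (Int × Int)) (L1 L2 : List (List Int))
    (hc1 : ∀ x, x ∈ PySem.List.pyRange 0 n 1 ↔ ∃ b ∈ L1, x ∈ b) (hg1 : GoodComps c L1)
    (hc2 : ∀ x, x ∈ PySem.List.pyRange 0 n 1 ↔ ∃ b ∈ L2, x ∈ b) (hg2 : GoodComps c L2)
    (b : List Int) (hb : b ∈ L1) : b.toFinset ∈ L2.map List.toFinset := by
  obtain ⟨r, hr⟩ := List.exists_mem_of_ne_nil b (hg1.2.1 b hb).2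
  have hrng : r ∈ PySem.List.pyRange 0 n 1 := (hc1 r).mpr ⟨b, hb, hr⟩
  obtain ⟨b', hb', hrb'⟩ := (hc2 r).mp hrng
  refine List.mem_map.mpr ⟨b', hb', ?_⟩
  apply Finset.ext
  intro x
  rw [List.mem_toFinset, List.mem_toFinset, hg2.2.2 b' hb' r hrb' x,
    ← hg1.2.2 b hb r hr x]

theorem goodComps_map_toFinset_nodup (c : List (Int × Int)) (L : List (List Int))
    (hg : GoodComps c L) : (L.map List.toFinset).Nodup := by
  refine List.pairwise_map.mpr ?_
  refine List.Pairwise.imp_of_mem ?_ hg.1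
  intro b1 b2 h1 _ hdisj heq
  obtain ⟨x, hx⟩ := List.exists_mem_of_ne_nil b1 (hg.2.1 b1 h1).2
  have hx2 : x ∈ b2 := by
    rw [← List.mem_toFinset, ← heq, List.mem_toFinset]; exact hx
  exact hdisj x hx hx2

theorem part_sizes_perm (n : Int) (c : List (Int × Int))
    (L1 L2 : List (List Int))
    (hc1 : ∀ x, x ∈ PySem.List.pyRange 0 n 1 ↔ ∃ b ∈ L1, x ∈ b) (hg1 : GoodComps c L1)
    (hc2 : ∀ x, x ∈ PySem.List.pyRange 0 n 1 ↔ ∃ b ∈ L2, x ∈ b) (hg2 : GoodComps c L2) :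
    (L1.map (fun b => (b.length : Int))).Perm (L2.map (fun b => (b.length : Int))) := by
  have hmemiff : ∀ F, F ∈ L1.map List.toFinset ↔ F ∈ L2.map List.toFinset := by
    intro F
    constructor
    · intro hF
      rcases List.mem_map.mp hF with ⟨b, hb, rfl⟩
      exact class_finset_mem n c L1 L2 hc1 hg1 hc2 hg2 b hb
    · intro hF
      rcases List.mem_map.mp hF with ⟨b, hb, rfl⟩
      exact class_finset_mem n c L2 L1 hc2 hg2 hc1 hg1 b hb
  have hperm := (List.perm_ext_iff_of_nodup (goodComps_map_toFinset_nodup c L1 hg1)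
    (goodComps_map_toFinset_nodup c L2 hg2)).mpr hmemiff
  have hlen : ∀ (L : List (List Int)), (∀ b ∈ L, b.Nodup ∧ b ≠ []) →
      L.map (fun b => (b.length : Int)) =
        (L.map List.toFinset).map (fun F => (F.card : Int)) := by
    intro L hnd
    rw [List.map_map]
    refine List.map_congr_left ?_
    intro b hb
    simp only [Function.comp_apply]
    rw [List.toFinset_card_of_nodup (hnd b hb).1]
  rw [hlen L1 hg1.2.1, hlen L2 hg2.2.1]
  exact hperm.map _

theorem gMul_rightComm (a x y : Int) : gMul (gMul a x) y = gMul (gMul a y) x := by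
  unfold gMul
  rw [PySem.Int.mod_eq_emod_of_pos (by norm_num), PySem.Int.mod_eq_emod_of_pos (by norm_num),
    PySem.Int.mod_eq_emod_of_pos (by norm_num), PySem.Int.mod_eq_emod_of_pos (by norm_num)]
  have key : ∀ u v : Int, (u % 1000000007 * v) % 1000000007 = u * v % 1000000007 := by
    intro u v
    conv_rhs => rw [Int.mul_emod]
    rw [Int.mul_emod (u % 1000000007), Int.emod_emod_of_dvd _ dvd_rfl]
  rw [key, key, mul_right_comm]

theorem foldl_gMul_perm {l1 l2 : List Int} (h : l1.Perm l2) :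
    ∀ a : Int, l1.foldl gMul a = l2.foldl gMul a := by
  induction h with
  | nil => intro a; rfl
  | cons x _ ih => intro a; simp only [List.foldl_cons]; exact ih _
  | swap x y l => intro a; simp only [List.foldl_cons]; rw [gMul_rightComm]
  | trans _ _ ih1 ih2 => intro a; rw [ih1, ih2]

-- ===== VERDICT (by name: the statement is the Claim_ definition above) =====
theorem solution_spec : Claim_equal_solution := by
  unfold Claim_equal_solution
  intro n c _ hpre
  unfold Spec_solution Pre_solution at *
  rw [solution_eq, solution_alt_eq]
  -- A side: run the outer-loop invariant over all of range(n)
  have hA := aFold n c hpre (NAfun n c) (buildA_mem n c) (buildA_len n c)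
    (1 + n.toNat * (2 * c.length))
    (by rw [PySem.List.length_pyRange_one]; simp; rw [Nat.mul_comm])
    (PySem.List.pyRange 0 n 1) [] (fun i hi => hi)
    ((PySem.Set.empty : PySem.Set Int), ([] : List Int))
    ⟨[], ⟨List.Pairwise.nil, by simp, by simp⟩, by simp [PySem.Set.empty],
      by simp, by simp [PySem.Set.empty], by simp [PySem.Set.empty], by simp⟩
  rw [List.nil_append] at hA
  obtain ⟨compsA, hgA, hcovA, hsizes, -, hsubA, hallA⟩ := hA
  -- its cover is exactly range(n)
  have hcA : ∀ x, x ∈ PySem.List.pyRange 0 n 1 ↔ ∃ b ∈ compsA, x ∈ b := by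
    intro x
    constructor
    · intro hx; exact (hcovA x).mp (hallA x hx)
    · intro hx
      exact hsubA x ((hcovA x).mpr hx)
  -- B side: the merge loop yields a GoodComps cover of range(n)
  have hB := isPart_fold n c [] ((PySem.List.pyRange 0 n 1).map (fun i => [i])) hpre
    (isPart_init n)
  rw [List.nil_append] at hB
  obtain ⟨hcB, hgB⟩ := hB
  -- same multiset of sizes, hence the same factorial product mod p
  have hperm := part_sizes_perm n c compsA _ hcA hgA hcB hgB
  rw [hsizes]
  calc List.foldl fMul 1 (compsA.map fun b => (b.length : Int))
      = List.foldl gMul 1 (compsA.map fun b => (b.length : Int)) :=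
        PySem.List.foldl_congr_mem _ _ _ _ (fun acc x _ => fMul_eq_gMul acc x)
    _ = List.foldl gMul 1
          ((c.foldl mergeStep ((PySem.List.pyRange 0 n 1).map (fun i => [i]))).map
            fun b => (b.length : Int)) := foldl_gMul_perm hperm 1
    _ = _ := List.foldl_map
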